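-- pv_equiv track=rewrite | github.com/richard-willdooit/Pentaho-reports-for-OpenERP | openerp_addon/pentaho_report_parameter_sets/report_formulae.py | search_string_to_next
-- ===== SOURCE A (Python) =====
-- PAIRS = {'"': '"',
--          "'": "'",
--          '(': ')',
--          }
--
-- def search_string_to_next(s, searching, pointer):
--     in_something = False
--     while pointer < len(s):
--         pointer += 1
--         if in_something:
--             if s[pointer-1:pointer] == PAIRS[in_something]:
--                 in_something = False
--         else:
--             if s[pointer-1:pointer] in searching:
--                 return s[:pointer-1]
--             if s[pointer-1:pointer] in PAIRS:
--                 in_something = s[pointer-1:pointer]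
--     return s
-- ===== SOURCE B (Python) =====
-- PAIRS = {'"': '"',
--          "'": "'",
--          '(': ')',
--          }
--
-- def search_string_to_next(s, searching, pointer):
--     n = len(s)
--     while pointer < n:
--         ch = s[pointer:pointer+1]
--         if ch in searching:
--             return s[:pointer]
--         if ch in PAIRS:
--             close = PAIRS[ch]
--             pointer += 1
--             while pointer < n and s[pointer:pointer+1] != close:
--                 pointer += 1
--             if pointer >= n:
--                 return s
--         pointer += 1
--     return s
-- ===== Notes on version B (the rewrite author's own statement) =====
-- stated objective: alternative
-- what changed: B replaces A's single while-loop with an in_something state flag by a nested-loop decomposition: an outer scan over positions with no state variable, where an opening delimiter triggers an inner loop that skips forward to the first matching close character (returning the whole string if none is found).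
import Mathlib
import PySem

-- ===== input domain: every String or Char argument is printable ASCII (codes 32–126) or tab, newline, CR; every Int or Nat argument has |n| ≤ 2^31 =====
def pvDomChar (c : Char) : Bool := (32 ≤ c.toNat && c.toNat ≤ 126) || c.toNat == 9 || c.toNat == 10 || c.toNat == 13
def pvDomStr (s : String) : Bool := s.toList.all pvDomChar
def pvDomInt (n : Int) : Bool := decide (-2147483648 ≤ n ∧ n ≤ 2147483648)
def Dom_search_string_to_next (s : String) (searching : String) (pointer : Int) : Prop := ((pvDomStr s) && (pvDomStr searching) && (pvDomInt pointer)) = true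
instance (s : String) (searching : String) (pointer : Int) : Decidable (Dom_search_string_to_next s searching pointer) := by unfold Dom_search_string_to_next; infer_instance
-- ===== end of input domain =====

-- B replaces A's state-flag while-loop by a nested-loop decomposition (an outer position scan with
-- no state variable plus an inner skip-to-first-matching-close loop); same return value everywhere.

-- ===== PORT A =====

-- PAIRS = {'"': '"', "'": "'", '(': ')'}
def pvPAIRS : PySem.Dict String String :=
  PySem.Dict.ofList [("\"", "\""), ("'", "'"), ("(", ")")]

-- A's while-loop; in_something : Option String models Python's False / one-char-string flag.
-- PAIRS[in_something] is ported as (get? …).getD "": the flag is always a key of PAIRS when set,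
-- so the KeyError branch is unreachable and the default is never used.
def pvALoop (s searching : String) (in_something : Option String) (pointer : Int) : String :=
  if pointer < (PySem.Str.len s : Int) then
    -- pointer += 1, then s[pointer-1:pointer] — written with the incremented pointer inline
    let ch := PySem.Str.slice s (some (pointer + 1 - 1)) (some (pointer + 1))
    match in_something with
    | some x =>
      if ch = (pvPAIRS.get? x).getD "" then
        pvALoop s searching none (pointer + 1)
      else
        pvALoop s searching (some x) (pointer + 1)
    | none =>
      if PySem.Str.isIn ch searching then
        PySem.Str.slice s none (some (pointer + 1 - 1))      -- return s[:pointer-1]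
      else if pvPAIRS.contains ch then
        pvALoop s searching (some ch) (pointer + 1)
      else
        pvALoop s searching none (pointer + 1)
  else s
termination_by ((PySem.Str.len s : Int) - pointer).toNat
decreasing_by all_goals omega

def search_string_to_next (s : String) (searching : String) (pointer : Int) : String :=
  pvALoop s searching none pointer        -- in_something = False

-- ===== PORT B =====

def pvPAIRS_alt : PySem.Dict String String :=
  PySem.Dict.ofList [("\"", "\""), ("'", "'"), ("(", ")")]

-- inner loop: while pointer < n and s[pointer:pointer+1] != close: pointer += 1
def pvSkip (s : String) (close : String) (pointer : Int) : Int :=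
  if pointer < (PySem.Str.len s : Int) ∧
     PySem.Str.slice s (some pointer) (some (pointer + 1)) ≠ close then
    pvSkip s close (pointer + 1)
  else pointer
termination_by ((PySem.Str.len s : Int) - pointer).toNat
decreasing_by omega

-- termination fact cited by pvBLoop's decreasing_by: the inner loop never moves backwards
theorem pvSkip_ge_aux (s close : String) :
    ∀ (n : Nat) (p : Int), ((s.length : Int) - p).toNat ≤ n → p ≤ pvSkip s close p := by
  intro n
  induction n with
  | zero =>
      intro p hp
      rw [pvSkip.eq_def]
      split_ifs with h
      · simp only [PySem.Str.len_eq, String.length_toList] at h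
        omega
      · omega
  | succ n ih =>
      intro p hp
      rw [pvSkip.eq_def]
      split_ifs with h
      · simp only [PySem.Str.len_eq, String.length_toList] at h
        have := ih (p + 1) (by omega)
        omega
      · omega

theorem pvSkip_ge (s close : String) (p : Int) : p ≤ pvSkip s close p :=
  pvSkip_ge_aux s close (((s.length : Int) - p).toNat) p le_rfl

-- B's outer loop
def pvBLoop (s searching : String) (pointer : Int) : String :=
  if pointer < (PySem.Str.len s : Int) then
    let ch := PySem.Str.slice s (some pointer) (some (pointer + 1))
    if PySem.Str.isIn ch searching then
      PySem.Str.slice s none (some pointer)                  -- return s[:pointer]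
    else if pvPAIRS_alt.contains ch then
      let p' := pvSkip s ((pvPAIRS_alt.get? ch).getD "") (pointer + 1)
      if p' ≥ (PySem.Str.len s : Int) then s
      else pvBLoop s searching (p' + 1)
    else
      pvBLoop s searching (pointer + 1)
  else s
termination_by ((PySem.Str.len s : Int) - pointer).toNat
decreasing_by
  · have := pvSkip_ge s ((pvPAIRS_alt.get? (PySem.Str.slice s (some pointer) (some (pointer + 1)))).getD "") (pointer + 1)
    omega
  · omega

def search_string_to_next_alt (s : String) (searching : String) (pointer : Int) : String :=
  pvBLoop s searching pointer

-- ===== PRECONDITION & SPEC =====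
def Spec_search_string_to_next (s : String) (searching : String) (pointer : Int) (out : String) : Prop := out = search_string_to_next_alt s searching pointer
instance (s : String) (searching : String) (pointer : Int) (out : String) : Decidable (Spec_search_string_to_next s searching pointer out) := by unfold Spec_search_string_to_next; infer_instance

-- ===== CLAIM (what is proved, stated in full; the proofs are below) =====
def Claim_equal_search_string_to_next : Prop := ∀ (s : String) (searching : String) (pointer : Int), Dom_search_string_to_next s searching pointer → Spec_search_string_to_next s searching pointer (search_string_to_next s searching pointer)

-- ===== LEMMAS AND PROOFS =====

theorem pvPAIRS_alt_eq : pvPAIRS_alt = pvPAIRS := rfl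

-- A's loop in the "inside a span" state equals B's skip loop followed by the plain state
theorem pvALoop_some (s searching x : String) :
    ∀ (n : Nat) (p : Int), ((s.length : Int) - p).toNat ≤ n →
      pvALoop s searching (some x) p =
        (if pvSkip s ((pvPAIRS.get? x).getD "") p < (s.length : Int) then
          pvALoop s searching none (pvSkip s ((pvPAIRS.get? x).getD "") p + 1)
        else s) := by
  intro n
  induction n with
  | zero =>
      intro p hp
      rw [pvALoop.eq_def, pvSkip.eq_def]
      have hL : ¬ p < (s.length : Int) := by omega
      simp only [PySem.Str.len_eq, String.length_toList]
      simp [hL]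
  | succ n ih =>
      intro p hp
      rw [pvALoop.eq_def, pvSkip.eq_def]
      simp only [PySem.Str.len_eq, String.length_toList, Int.add_sub_cancel]
      by_cases hL : p < (s.length : Int)
      · by_cases hc : PySem.Str.slice s (some p) (some (p + 1)) = (pvPAIRS.get? x).getD ""
        · simp [hL, hc]
        · simp only [hL, if_true, hc, if_neg, not_false_iff, true_and, if_pos (hc : _ ≠ _)]
          exact ih (p + 1) (by omega)
      · simp [hL]

-- A's loop in the plain state equals B's outer loop
theorem pvALoop_none (s searching : String) :
    ∀ (n : Nat) (p : Int), ((s.length : Int) - p).toNat ≤ n →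
      pvALoop s searching none p = pvBLoop s searching p := by
  intro n
  induction n with
  | zero =>
      intro p hp
      rw [pvALoop.eq_def, pvBLoop.eq_def]
      simp only [pvPAIRS_alt_eq]
      have hL : ¬ p < (s.length : Int) := by omega
      simp only [PySem.Str.len_eq, String.length_toList]
      simp [hL]
  | succ n ih =>
      intro p hp
      rw [pvALoop.eq_def, pvBLoop.eq_def]
      simp only [pvPAIRS_alt_eq]
      simp only [PySem.Str.len_eq, String.length_toList, Int.add_sub_cancel]
      by_cases hL : p < (s.length : Int)
      · simp only [hL, if_true]
        by_cases hs : PySem.Str.isIn (PySem.Str.slice s (some p) (some (p + 1))) searching = true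
        · rw [if_pos hs, if_pos hs]
        · rw [if_neg hs, if_neg hs]
          by_cases hk : pvPAIRS.contains (PySem.Str.slice s (some p) (some (p + 1))) = true
          · simp only [hk, if_true]
            rw [pvALoop_some s searching _ n (p + 1) (by omega)]
            have hge : p + 1 ≤ pvSkip s ((pvPAIRS.get? (PySem.Str.slice s (some p) (some (p + 1)))).getD "") (p + 1) :=
              pvSkip_ge s _ (p + 1)
            set q := pvSkip s ((pvPAIRS.get? (PySem.Str.slice s (some p) (some (p + 1)))).getD "") (p + 1) with hq
            by_cases hqL : q < (s.length : Int)
            · rw [if_pos hqL, if_neg (by omega : ¬ q ≥ (s.length : Int))]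
              exact ih (q + 1) (by omega)
            · rw [if_neg hqL, if_pos (by omega : q ≥ (s.length : Int))]
          · rw [if_neg hk, if_neg hk]
            exact ih (p + 1) (by omega)
      · simp [hL]

-- ===== VERDICT (by name: the statement is the Claim_ definition above) =====
theorem search_string_to_next_spec : Claim_equal_search_string_to_next := by
  intro s searching pointer _hdom
  unfold Spec_search_string_to_next search_string_to_next search_string_to_next_alt
  exact pvALoop_none s searching ((s.length : Int) - pointer).toNat pointer le_rfl
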